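-- pv_equiv track=rewrite | github.com/MrBrantCode/unitest_baseline | mut_generate/mist_train_taco/taco_7084/solution.py | largest_smallest_team_size
-- ===== SOURCE A (Python) =====
-- import collections
-- import itertools
--
-- def largest_smallest_team_size(skills):
--     if not skills:
--         return 0
--
--     finished_team_lengths = []
--     current_team_starts = collections.deque()
--
--     def go(s, c):
--         while len(current_team_starts) < c:
--             current_team_starts.append(s)
--         while len(current_team_starts) > c:
--             finished_team_lengths.append(s - current_team_starts.popleft())
--
--     last_s = skills[0] - 1
--     for (s, g) in itertools.groupby(skills):
--         if s > last_s + 1: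
--             go(last_s + 1, 0)
--         go(s, sum((1 for _ in g)))
--         last_s = s
--
--     go(last_s + 1, 0)
--
--     return min(finished_team_lengths)
-- ===== SOURCE B (Python) =====
-- from itertools import groupby
--
-- def _events(skills):
--     # Stage 1: run-length-encoded open/close events (position, multiplicity) in time order.
--     opens, closes = [], []
--     prev = 0
--     last = skills[0] - 1
--     for s, g in groupby(skills):
--         c = sum(1 for _ in g)
--         if s > last + 1 and prev > 0:
--             closes.append((last + 1, prev))
--             prev = 0
--         if c > prev:
--             opens.append((s, c - prev))
--         elif c < prev:
--             closes.append((s, prev - c))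
--         prev = c
--         last = s
--     if prev > 0:
--         closes.append((last + 1, prev))
--     return opens, closes
--
-- def largest_smallest_team_size(skills):
--     # Stage 2: two-pointer merge of the RLE event lists, FIFO order, running minimum.
--     if not skills:
--         return 0
--     opens, closes = _events(skills)
--     opens.reverse()
--     closes.reverse()
--     best = None
--     while opens and closes:
--         p, m = opens.pop()
--         q, k = closes.pop()
--         w = q - p
--         if best is None or w < best:
--             best = w
--         if k < m:
--             opens.append((p, m - k))
--         elif m < k:
--             closes.append((q, k - m))
--     return best
-- ===== Notes on version B (the rewrite author's own statement) =====
-- stated objective: alternative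
-- what changed: Replaces A's live FIFO deque holding one start position per open team (pushed/popped unit by unit, with min() over the collected lengths at the end) by two staged passes: run-length-encoded open/close event lists, then a two-pointer merge of the two RLE lists that keeps a running minimum and never materializes per-team elements.
import Mathlib
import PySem

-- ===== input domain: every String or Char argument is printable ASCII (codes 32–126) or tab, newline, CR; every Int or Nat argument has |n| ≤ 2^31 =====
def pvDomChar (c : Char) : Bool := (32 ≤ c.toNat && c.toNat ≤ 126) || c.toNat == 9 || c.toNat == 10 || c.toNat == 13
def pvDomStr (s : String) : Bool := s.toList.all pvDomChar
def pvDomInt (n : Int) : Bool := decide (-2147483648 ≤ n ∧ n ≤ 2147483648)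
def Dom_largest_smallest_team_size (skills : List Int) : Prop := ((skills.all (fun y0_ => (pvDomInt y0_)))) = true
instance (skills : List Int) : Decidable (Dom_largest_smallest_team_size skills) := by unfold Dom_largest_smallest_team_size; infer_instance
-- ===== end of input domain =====

-- B replaces A's live FIFO deque of per-team start positions by two staged passes:
-- run-length-encoded open/close event lists, then a two-pointer merge keeping a
-- running minimum (objective "alternative").

-- ===== PORT A =====
-- itertools.groupby over a list of ints: consecutive runs as (value, run length)
def pyGroupby : List Int → List (Int × Nat)
  | [] => []
  | x :: xs =>
    (x, 1 + (xs.takeWhile (· = x)).length) :: pyGroupby (xs.dropWhile (· = x))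
  termination_by l => l.length
  decreasing_by
    simp only [List.length_cons]
    exact Nat.lt_succ_of_le (List.length_dropWhile_le _ _)

-- first while of go: append s until the deque has length c
def goApp (s : Int) (c : Nat) (dq : List Int) : List Int :=
  if dq.length < c then goApp s c (dq ++ [s]) else dq
  termination_by c - dq.length
  decreasing_by simp; omega

-- second while of go: popleft and record s - start until the deque has length c
def goPop (s : Int) (c : Nat) (fin dq : List Int) : List Int × List Int :=
  if c < dq.length then
    match dq with
    | [] => (fin, [])
    | d :: rest => goPop s c (fin ++ [s - d]) rest
  else (fin, dq)
  termination_by dq.length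

def goA (s : Int) (c : Nat) (fin dq : List Int) : List Int × List Int :=
  goPop s c fin (goApp s c dq)

-- the for-loop over itertools.groupby(skills); state = (finished, deque, last_s)
def loopA : List (Int × Nat) → List Int → List Int → Int → List Int × List Int × Int
  | [], fin, dq, last => (fin, dq, last)
  | (s, c) :: rest, fin, dq, last =>
    let p1 := if s > last + 1 then goA (last + 1) 0 fin dq else (fin, dq)
    let p2 := goA s c p1.1 p1.2
    loopA rest p2.1 p2.2 s

-- final go(last_s + 1, 0) and min(finished); finished is nonempty whenever
-- skills is nonempty, so Python's min never raises and getD 0 is never used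
def finishA : List Int × List Int × Int → Int
  | (fin, dq, last) => (PySem.List.min? (goA (last + 1) 0 fin dq).1 (fun y => y)).getD 0

def largest_smallest_team_size (skills : List Int) : Int :=
  match skills with
  | [] => 0
  | x :: _ => finishA (loopA (pyGroupby skills) [] [] (x - 1))

-- ===== PORT B =====
-- _events of Source B, gap block: flush the open teams into closes when heights cannot touch
def gapE (s last : Int) (closes : List (Int × Nat)) (prev : Nat) : List (Int × Nat) × Nat :=
  if s > last + 1 ∧ 0 < prev then (closes ++ [(last + 1, prev)], 0) else (closes, prev)

-- _events of Source B, move block: record a rise in opens, a fall in closes (RLE, one pair per event)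
def moveE (s : Int) (c prev : Nat) (opens closes : List (Int × Nat)) :
    List (Int × Nat) × List (Int × Nat) :=
  if prev < c then (opens ++ [(s, c - prev)], closes)
  else if c < prev then (opens, closes ++ [(s, prev - c)])
  else (opens, closes)

-- the for-loop of _events; state = (opens, closes, prev, last); final flush on exit
def eventsB : List (Int × Nat) → List (Int × Nat) → List (Int × Nat) → Nat → Int →
    List (Int × Nat) × List (Int × Nat)
  | [], opens, closes, prev, last =>
    (opens, if 0 < prev then closes ++ [(last + 1, prev)] else closes)
  | (s, c) :: rest, opens, closes, prev, last =>
    eventsB rest (moveE s c (gapE s last closes prev).2 opens (gapE s last closes prev).1).1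
                 (moveE s c (gapE s last closes prev).2 opens (gapE s last closes prev).1).2 c s

-- 'if best is None or w < best: best = w' of Source B
def optMin (best : Option Int) (w : Int) : Option Int :=
  match best with
  | none => some w
  | some b => if w < b then some w else some b

-- the while-loop of Source B: two-pointer merge of the reversed RLE stacks
-- (pop from a reversed Python list = take the head here)
def mergeB : List (Int × Nat) → List (Int × Nat) → Option Int → Option Int
  | (p, m) :: os, (q, k) :: cs, best =>
    let best' := optMin best (q - p)
    if k < m then mergeB ((p, m - k) :: os) cs best'
    else if m < k then mergeB os ((q, k - m) :: cs) best'
    else mergeB os cs best'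
  | _, _, best => best
  termination_by os cs _ => os.length + cs.length
  decreasing_by all_goals (simp only [List.length_cons]; omega)

def largest_smallest_team_size_alt (skills : List Int) : Int :=
  match skills with
  | [] => 0
  | x :: _ =>
    let ev := eventsB (pyGroupby skills) [] [] 0 (x - 1)
    -- best is never None here (a nonempty skills list yields at least one event pair)
    (mergeB ev.1 ev.2 none).getD 0

-- ===== PRECONDITION & SPEC =====
def Spec_largest_smallest_team_size (skills : List Int) (out : Int) : Prop := out = largest_smallest_team_size_alt skills
instance (skills : List Int) (out : Int) : Decidable (Spec_largest_smallest_team_size skills out) := by unfold Spec_largest_smallest_team_size; infer_instance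

-- ===== CLAIM (what is proved, stated in full; the proofs are below) =====
def Claim_equal_largest_smallest_team_size : Prop := ∀ (skills : List Int), Dom_largest_smallest_team_size skills → Spec_largest_smallest_team_size skills (largest_smallest_team_size skills)

-- ===== LEMMAS AND PROOFS =====

-- proof-side intermediate formulation: B's event lists expanded unit by unit
def expand (l : List (Int × Nat)) : List Int := l.flatMap (fun pm => List.replicate pm.2 pm.1)

def gapB (s last : Int) (downs : List Int) (prev : Nat) : List Int × Nat :=
  if s > last + 1 ∧ 0 < prev then (downs ++ List.replicate prev (last + 1), 0) else (downs, prev)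

def moveB (s : Int) (c prev : Nat) (ups downs : List Int) : List Int × List Int :=
  if prev < c then (ups ++ List.replicate (c - prev) s, downs)
  else if c < prev then (ups, downs ++ List.replicate (prev - c) s)
  else (ups, downs)

def loopB : List (Int × Nat) → List Int → List Int → Nat → Int → List Int × List Int × Nat × Int
  | [], ups, downs, prev, last => (ups, downs, prev, last)
  | (s, c) :: rest, ups, downs, prev, last =>
    loopB rest (moveB s c (gapB s last downs prev).2 ups (gapB s last downs prev).1).1
               (moveB s c (gapB s last downs prev).2 ups (gapB s last downs prev).1).2 c s

def finishB : List Int × List Int × Nat × Int → Int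
  | (ups, downs, prev, last) =>
    (PySem.List.min? (List.zipWith (fun u d => d - u) ups (downs ++ List.replicate prev (last + 1))) (fun y => y)).getD 0

lemma goApp_eq (s : Int) (c : Nat) (dq : List Int) :
    goApp s c dq = dq ++ List.replicate (c - dq.length) s := by
  fun_induction goApp s c dq with
  | case1 dq h ih =>
    rw [ih]
    simp only [List.length_append, List.length_cons, List.length_nil]
    rw [List.append_assoc]
    congr 1
    have h2 : c - dq.length = (c - (dq.length + 1)) + 1 := by omega
    rw [h2, List.replicate_succ]
    simp
  | case2 dq h =>
    have h2 : c - dq.length = 0 := by omega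
    simp [h2]

lemma goPop_eq (s : Int) (c : Nat) (fin dq : List Int) :
    goPop s c fin dq =
      (fin ++ (dq.take (dq.length - c)).map (fun d => s - d), dq.drop (dq.length - c)) := by
  fun_induction goPop s c fin dq with
  | case1 fin h => simp at h
  | case2 fin d rest h ih =>
    rw [ih]
    have h' : c < rest.length + 1 := by simpa using h
    simp only [List.length_cons]
    have hm : rest.length + 1 - c = (rest.length - c) + 1 := by omega
    rw [hm]
    simp [List.take_succ_cons, List.drop_succ_cons]
  | case3 fin dq h =>
    have h2 : dq.length - c = 0 := by omega
    simp [h2]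

lemma goA_ge (s : Int) (c : Nat) (fin dq : List Int) (h : dq.length ≤ c) :
    goA s c fin dq = (fin, dq ++ List.replicate (c - dq.length) s) := by
  rw [goA, goApp_eq, goPop_eq]
  have h2 : (dq ++ List.replicate (c - dq.length) s).length = c := by simp; omega
  simp [h2]

lemma goA_le (s : Int) (c : Nat) (fin dq : List Int) (h : c ≤ dq.length) :
    goA s c fin dq =
      (fin ++ (dq.take (dq.length - c)).map (fun d => s - d), dq.drop (dq.length - c)) := by
  rw [goA, goApp_eq]
  have h2 : c - dq.length = 0 := by omega
  rw [h2]
  simp [goPop_eq]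

lemma gapB_pos_1 (s last : Int) (downs : List Int) (prev : Nat) (h : s > last + 1) :
    (gapB s last downs prev).1 = if 0 < prev then downs ++ List.replicate prev (last + 1) else downs := by
  by_cases hp : 0 < prev
  · rw [gapB, if_pos ⟨h, hp⟩, if_pos hp]
  · rw [gapB, if_neg (by tauto), if_neg hp]

lemma gapB_pos_2 (s last : Int) (downs : List Int) (prev : Nat) (h : s > last + 1) :
    (gapB s last downs prev).2 = 0 := by
  by_cases hp : 0 < prev
  · rw [gapB, if_pos ⟨h, hp⟩]
  · rw [gapB, if_neg (by tauto)]
    omega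

lemma gapB_neg_1 (s last : Int) (downs : List Int) (prev : Nat) (h : ¬ s > last + 1) :
    (gapB s last downs prev).1 = downs := by
  rw [gapB, if_neg (by tauto)]

lemma gapB_neg_2 (s last : Int) (downs : List Int) (prev : Nat) (h : ¬ s > last + 1) :
    (gapB s last downs prev).2 = prev := by
  rw [gapB, if_neg (by tauto)]

lemma moveB_1 (s : Int) (c prev : Nat) (ups downs : List Int) :
    (moveB s c prev ups downs).1 = if prev < c then ups ++ List.replicate (c - prev) s else ups := by
  rw [moveB]
  split_ifs <;> simp_all

lemma moveB_2 (s : Int) (c prev : Nat) (ups downs : List Int) :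
    (moveB s c prev ups downs).2 = if c < prev then downs ++ List.replicate (prev - c) s else downs := by
  rw [moveB]
  split_ifs <;> simp_all <;> omega

lemma zipWith_append_left (f : Int → Int → Int) (l l' l2 : List Int) (h : l2.length ≤ l.length) :
    List.zipWith f (l ++ l') l2 = List.zipWith f l l2 := by
  induction l generalizing l2 with
  | nil =>
    have h2 : l2 = [] := by cases l2 <;> simp_all
    simp [h2]
  | cons a t ih =>
    cases l2 with
    | nil => simp
    | cons b t2 =>
      simp only [List.cons_append, List.zipWith_cons_cons]
      rw [ih]
      simpa using h

lemma zipWith_sub_replicate (dq : List Int) (m : Nat) (s : Int) :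
    List.zipWith (fun u d => d - u) dq (List.replicate m s)
      = (dq.take m).map (fun d => s - d) := by
  induction dq generalizing m with
  | nil => simp
  | cons a t ih =>
    cases m with
    | zero => simp
    | succ k => simp [List.replicate_succ, ih]

-- closing m teams at position s: the zip gains exactly their widths
lemma pop_zip (ups downs dq : List Int) (m : Nat) (s : Int)
    (hlen : ups.length = downs.length + dq.length) (hdq : dq = ups.drop downs.length)
    (hm : m ≤ dq.length) :
    List.zipWith (fun u d => d - u) ups (downs ++ List.replicate m s)
      = List.zipWith (fun u d => d - u) ups downs ++ (dq.take m).map (fun d => s - d) := by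
  have hsplit : ups = ups.take downs.length ++ dq := by
    rw [hdq, List.take_append_drop]
  have htk : (ups.take downs.length).length = downs.length := by
    simp; omega
  conv_lhs => rw [hsplit]
  rw [List.zipWith_append htk]
  congr 1
  · conv_rhs => rw [hsplit]
    rw [zipWith_append_left]
    omega
  · have h2 : dq = dq.take m ++ dq.drop m := (List.take_append_drop m dq).symm
    conv_lhs => rw [h2]
    rw [zipWith_append_left, zipWith_sub_replicate]
    · simp [List.take_take]
    · simp; omega

-- the invariant tying A's state (fin, dq) to the expanded event state (ups, downs, prev)
def InvAB (ups downs fin dq : List Int) (prev : Nat) : Prop :=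
  prev = dq.length ∧ ups.length = downs.length + dq.length ∧
  fin = List.zipWith (fun u d => d - u) ups downs ∧ dq = ups.drop downs.length

lemma inv_go (ups downs fin dq : List Int) (prev : Nat) (s : Int) (c : Nat)
    (h : InvAB ups downs fin dq prev) :
    InvAB (if prev < c then ups ++ List.replicate (c - prev) s else ups)
          (if c < prev then downs ++ List.replicate (prev - c) s else downs)
          (goA s c fin dq).1 (goA s c fin dq).2 c := by
  obtain ⟨hp, hl, hf, hd⟩ := h
  subst hp
  by_cases hge : dq.length ≤ c
  · have hups : (if dq.length < c then ups ++ List.replicate (c - dq.length) s else ups)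
        = ups ++ List.replicate (c - dq.length) s := by
      split_ifs with h1
      · rfl
      · have h2 : c - dq.length = 0 := by omega
        simp [h2]
    rw [goA_ge _ _ _ _ hge, hups, if_neg (by omega)]
    refine ⟨?_, ?_, ?_, ?_⟩
    · simp; omega
    · simp; omega
    · rw [zipWith_append_left _ _ _ _ (by omega)]
      exact hf
    · rw [List.drop_append_of_le_length (by omega), ← hd]
  · have hlt : c ≤ dq.length := by omega
    rw [goA_le _ _ _ _ hlt, if_neg (by omega), if_pos (by omega)]
    refine ⟨?_, ?_, ?_, ?_⟩
    · simp; omega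
    · simp; omega
    · rw [pop_zip ups downs dq (dq.length - c) s hl hd (by omega), ← hf]
    · rw [hd, List.drop_drop]
      simp

lemma main_inv (gs : List (Int × Nat)) :
    ∀ (fin dq : List Int) (last : Int) (ups downs : List Int) (prev : Nat),
      InvAB ups downs fin dq prev →
      finishA (loopA gs fin dq last) = finishB (loopB gs ups downs prev last) := by
  induction gs with
  | nil =>
    intro fin dq last ups downs prev hinv
    obtain ⟨hp, hl, hf, hd⟩ := hinv
    subst hp
    simp only [loopA, loopB, finishA, finishB]
    rw [goA_le _ _ _ _ (Nat.zero_le _)]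
    simp only [Nat.sub_zero, List.take_length]
    rw [pop_zip ups downs dq dq.length (last + 1) hl hd (le_refl _), ← hf, List.take_length]
  | cons g rest ih =>
    obtain ⟨s, c⟩ := g
    intro fin dq last ups downs prev hinv
    simp only [loopA, loopB]
    by_cases hgap : s > last + 1
    · rw [if_pos hgap, gapB_pos_1 _ _ _ _ hgap, gapB_pos_2 _ _ _ _ hgap, moveB_1, moveB_2]
      have h1 := inv_go ups downs fin dq prev (last + 1) 0 hinv
      rw [if_neg (Nat.not_lt_zero prev)] at h1
      simp only [Nat.sub_zero] at h1
      have h2 := inv_go _ _ _ _ _ s c h1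
      exact ih _ _ s _ _ c h2
    · rw [if_neg hgap, gapB_neg_1 _ _ _ _ hgap, gapB_neg_2 _ _ _ _ hgap, moveB_1, moveB_2,
          show ((fin, dq) : List Int × List Int).1 = fin from rfl,
          show ((fin, dq) : List Int × List Int).2 = dq from rfl]
      exact ih _ _ s _ _ c (inv_go ups downs fin dq prev s c hinv)

-- ===== bridging B's RLE events to the expanded state =====

lemma expand_append_one (l : List (Int × Nat)) (p : Int) (m : Nat) :
    expand (l ++ [(p, m)]) = expand l ++ List.replicate m p := by
  simp [expand]

lemma gapE_1 (s last : Int) (closes : List (Int × Nat)) (prev : Nat) :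
    expand (gapE s last closes prev).1 = (gapB s last (expand closes) prev).1 := by
  rw [gapE, gapB]
  split_ifs with h
  · rw [expand_append_one]
  · rfl

lemma gapE_2 (s last : Int) (closes : List (Int × Nat)) (prev : Nat) :
    (gapE s last closes prev).2 = (gapB s last (expand closes) prev).2 := by
  rw [gapE, gapB]
  split_ifs with h <;> rfl

lemma moveE_1 (s : Int) (c prev : Nat) (opens closes : List (Int × Nat)) :
    expand (moveE s c prev opens closes).1
      = (moveB s c prev (expand opens) (expand closes)).1 := by
  rw [moveE, moveB]
  split_ifs with h1 h2
  · rw [expand_append_one]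
  · rfl
  · rfl

lemma moveE_2 (s : Int) (c prev : Nat) (opens closes : List (Int × Nat)) :
    expand (moveE s c prev opens closes).2
      = (moveB s c prev (expand opens) (expand closes)).2 := by
  rw [moveE, moveB]
  split_ifs with h1 h2
  · rfl
  · rw [expand_append_one]
  · rfl

lemma events_expand (gs : List (Int × Nat)) :
    ∀ (opens closes : List (Int × Nat)) (prev : Nat) (last : Int),
      expand (eventsB gs opens closes prev last).1
          = (loopB gs (expand opens) (expand closes) prev last).1 ∧
      expand (eventsB gs opens closes prev last).2
          = (loopB gs (expand opens) (expand closes) prev last).2.1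
              ++ List.replicate (loopB gs (expand opens) (expand closes) prev last).2.2.1
                   ((loopB gs (expand opens) (expand closes) prev last).2.2.2 + 1) := by
  induction gs with
  | nil =>
    intro opens closes prev last
    simp only [eventsB, loopB]
    refine ⟨by simp, ?_⟩
    by_cases hp : 0 < prev
    · rw [if_pos hp, expand_append_one]
    · rw [if_neg hp]
      have h0 : prev = 0 := by omega
      simp [h0]
  | cons g rest ih =>
    obtain ⟨s, c⟩ := g
    intro opens closes prev last
    have e1 : expand (moveE s c (gapE s last closes prev).2 opens (gapE s last closes prev).1).1
        = (moveB s c (gapB s last (expand closes) prev).2 (expand opens)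
            (gapB s last (expand closes) prev).1).1 := by
      rw [moveE_1, gapE_1, gapE_2]
    have e2 : expand (moveE s c (gapE s last closes prev).2 opens (gapE s last closes prev).1).2
        = (moveB s c (gapB s last (expand closes) prev).2 (expand opens)
            (gapB s last (expand closes) prev).1).2 := by
      rw [moveE_2, gapE_1, gapE_2]
    obtain ⟨ih1, ih2⟩ := ih (moveE s c (gapE s last closes prev).2 opens (gapE s last closes prev).1).1
      (moveE s c (gapE s last closes prev).2 opens (gapE s last closes prev).1).2 c s
    rw [e1, e2] at ih1 ih2
    simp only [eventsB, loopB]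
    exact ⟨ih1, ih2⟩

-- all multiplicities produced by eventsB are positive
def PosM (l : List (Int × Nat)) : Prop := ∀ x ∈ l, 0 < x.2

lemma posM_append_one (l : List (Int × Nat)) (p : Int) (m : Nat) (hl : PosM l) (hm : 0 < m) :
    PosM (l ++ [(p, m)]) := by
  intro x hx
  rcases List.mem_append.mp hx with h | h
  · exact hl x h
  · simp at h; subst h; exact hm

lemma events_pos (gs : List (Int × Nat)) :
    ∀ (opens closes : List (Int × Nat)) (prev : Nat) (last : Int),
      PosM opens → PosM closes →
      PosM (eventsB gs opens closes prev last).1 ∧ PosM (eventsB gs opens closes prev last).2 := by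
  induction gs with
  | nil =>
    intro opens closes prev last ho hc
    simp only [eventsB]
    refine ⟨ho, ?_⟩
    split_ifs with hp
    · exact posM_append_one _ _ _ hc hp
    · exact hc
  | cons g rest ih =>
    obtain ⟨s, c⟩ := g
    intro opens closes prev last ho hc
    simp only [eventsB]
    have hc1 : PosM (gapE s last closes prev).1 := by
      rw [gapE]; split_ifs with h
      · exact posM_append_one _ _ _ hc h.2
      · exact hc
    have ho2 : PosM (moveE s c (gapE s last closes prev).2 opens (gapE s last closes prev).1).1 := by
      rw [moveE]; split_ifs with h1 h2
      · exact posM_append_one _ _ _ ho (by omega)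
      · exact ho
      · exact ho
    have hc2 : PosM (moveE s c (gapE s last closes prev).2 opens (gapE s last closes prev).1).2 := by
      rw [moveE]; split_ifs with h1 h2
      · exact hc1
      · exact posM_append_one _ _ _ hc1 (by omega)
      · exact hc1
    exact ih _ _ c s ho2 hc2

-- ===== the merge computes the running minimum of the expanded widths =====

lemma optMin_absorb (best : Option Int) (w : Int) : optMin (optMin best w) w = optMin best w := by
  cases best with
  | none => simp [optMin]
  | some b =>
    by_cases h : w < b
    · simp [optMin, h]
    · simp [optMin, h]

lemma foldl_optMin_replicate (k : Nat) (best : Option Int) (w : Int) :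
    List.foldl optMin (optMin best w) (List.replicate k w) = optMin best w := by
  induction k with
  | zero => rfl
  | succ n ih => rw [List.replicate_succ, List.foldl_cons, optMin_absorb, ih]

lemma zipWith_sub_replicate2 (k : Nat) (p q : Int) :
    List.zipWith (fun u d => d - u) (List.replicate k p) (List.replicate k q)
      = List.replicate k (q - p) := by
  induction k with
  | zero => rfl
  | succ n ih => simp [List.replicate_succ, ih]

lemma foldl_optMin_replicate_pos (k : Nat) (hk : 0 < k) (best : Option Int) (w : Int) :
    List.foldl optMin best (List.replicate k w) = optMin best w := by
  obtain ⟨n, rfl⟩ : ∃ n, k = n + 1 := ⟨k - 1, by omega⟩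
  rw [List.replicate_succ, List.foldl_cons, foldl_optMin_replicate]

lemma expand_cons (p : Int) (m : Nat) (os : List (Int × Nat)) :
    expand ((p, m) :: os) = List.replicate m p ++ expand os := by
  simp [expand]

lemma replicate_split (m k : Nat) (h : k ≤ m) (p : Int) :
    List.replicate m p = List.replicate k p ++ List.replicate (m - k) p := by
  rw [← List.replicate_add]
  congr 1
  omega

lemma PosM_tail (x : Int × Nat) (l : List (Int × Nat)) (h : PosM (x :: l)) : PosM l :=
  fun y hy => h y (List.mem_cons_of_mem _ hy)

lemma PosM_cons (p : Int) (m : Nat) (l : List (Int × Nat)) (hm : 0 < m) (hl : PosM l) :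
    PosM ((p, m) :: l) := by
  intro y hy
  rcases List.mem_cons.mp hy with h | h
  · subst h; exact hm
  · exact hl y h

lemma mergeB_eq (os cs : List (Int × Nat)) (best : Option Int) :
    PosM os → PosM cs →
    mergeB os cs best
      = List.foldl optMin best (List.zipWith (fun u d => d - u) (expand os) (expand cs)) := by
  fun_induction mergeB os cs best with
  | case1 p m os q k cs best best' hk ih =>
    -- k < m : the close event is exhausted, part of the open event remains
    intro ho hc
    have hkpos : 0 < k := hc (q, k) (by simp)
    rw [expand_cons, expand_cons, replicate_split m k (by omega) p, List.append_assoc,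
        List.zipWith_append (by simp), zipWith_sub_replicate2, List.foldl_append,
        foldl_optMin_replicate_pos k hkpos,
        ih (PosM_cons p (m - k) os (by omega) (PosM_tail _ _ ho)) (PosM_tail _ _ hc),
        expand_cons]
  | case2 p m os q k cs best best' hk hm ih =>
    -- m < k : the open event is exhausted, part of the close event remains
    intro ho hc
    have hmpos : 0 < m := ho (p, m) (by simp)
    rw [expand_cons, expand_cons, replicate_split k m (by omega) q, List.append_assoc,
        List.zipWith_append (by simp), zipWith_sub_replicate2, List.foldl_append,
        foldl_optMin_replicate_pos m hmpos,
        ih (PosM_tail _ _ ho) (PosM_cons q (k - m) cs (by omega) (PosM_tail _ _ hc)),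
        expand_cons]
  | case3 p m os q k cs best best' hk hm ih =>
    -- m = k : both events are exhausted together
    intro ho hc
    have hmpos : 0 < m := ho (p, m) (by simp)
    have hkm : k = m := by omega
    rw [expand_cons, expand_cons, hkm, List.zipWith_append (by simp), zipWith_sub_replicate2,
        List.foldl_append, foldl_optMin_replicate_pos m hmpos,
        ih (PosM_tail _ _ ho) (PosM_tail _ _ hc)]
  | case4 os cs best h =>
    intro _ _
    cases os with
    | nil => simp [expand]
    | cons a os' =>
      cases cs with
      | nil => simp [expand]
      | cons b cs' => exact (h a.1 a.2 os' b.1 b.2 cs' (by simp) (by simp)).elim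
-- ===== min? as a foldl over optMin =====

lemma foldl_optMin_some (t : List Int) : ∀ (a : Int),
    List.foldl optMin (some a) t = some (t.foldl min a) := by
  induction t with
  | nil => intro a; rfl
  | cons x xs ih =>
    intro a
    rw [List.foldl_cons, List.foldl_cons, ← ih]
    congr 1
    simp only [optMin]
    split_ifs with h
    · congr 1; omega
    · congr 1; omega

lemma min?_foldl (l : List Int) :
    PySem.List.min? l (fun y => y) = List.foldl optMin none l := by
  cases l with
  | nil => rfl
  | cons x t =>
    rw [PySem.List.min?_id_cons]
    have : List.foldl optMin none (x :: t) = List.foldl optMin (some x) t := rfl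
    rw [this, foldl_optMin_some]

-- ===== VERDICT (by name: the statement is the Claim_ definition above) =====
theorem largest_smallest_team_size_spec : Claim_equal_largest_smallest_team_size := by
  intro skills _
  unfold Spec_largest_smallest_team_size
  cases skills with
  | nil => rfl
  | cons x xs =>
    have ha : largest_smallest_team_size (x :: xs)
        = finishA (loopA (pyGroupby (x :: xs)) [] [] (x - 1)) := rfl
    have hb : largest_smallest_team_size_alt (x :: xs)
        = (mergeB (eventsB (pyGroupby (x :: xs)) [] [] 0 (x - 1)).1
            (eventsB (pyGroupby (x :: xs)) [] [] 0 (x - 1)).2 none).getD 0 := rfl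
    rw [ha, hb,
        main_inv (pyGroupby (x :: xs)) [] [] (x - 1) [] [] 0 ⟨rfl, rfl, rfl, rfl⟩]
    obtain ⟨hp1, hp2⟩ := events_pos (pyGroupby (x :: xs)) [] [] 0 (x - 1)
      (by intro y hy; simp at hy) (by intro y hy; simp at hy)
    rw [mergeB_eq _ _ _ hp1 hp2]
    obtain ⟨he1, he2⟩ := events_expand (pyGroupby (x :: xs)) [] [] 0 (x - 1)
    rw [show expand ([] : List (Int × Nat)) = [] from rfl] at he1 he2
    rw [he1, he2]
    obtain ⟨ups, downs, prev, last⟩ := loopB (pyGroupby (x :: xs)) [] [] 0 (x - 1)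
    simp only [finishB]
    rw [min?_foldl]
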